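-- pv_equiv track=rewrite | github.com/corkami/mitra | parsers/postscript.py | bBalancedPar
-- ===== SOURCE A (Python) =====
-- def bBalancedPar(p):
-- 	"""check if parenthesis are balanced no matter the content"""
-- 	l = 0
-- 	for i, c in enumerate(p):
-- 		if c == ord(b"("):
-- 			l += 1
-- 		elif c == ord(b")"):
-- 			l -= 1
-- 			if l < 0:
-- 				return i
--
-- 	if l != 0:
-- 		return i + 1
-- 	return -1
-- ===== SOURCE B (Python) =====
-- def bBalancedPar(p):
--     """check if parenthesis are balanced no matter the content"""
--     sums = []
--     t = 0
--     for c in p: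
--         t += 1 if c == 40 else -1 if c == 41 else 0
--         sums.append(t)
--     for i, s in enumerate(sums):
--         if s < 0:
--             return i
--     if sums and sums[-1] != 0:
--         return len(p)
--     return -1
-- ===== Notes on version B (the rewrite author's own statement) =====
-- stated objective: alternative
-- what changed: Replaces the single counter-updating loop with an early return by a prefix-sum table built first, then a separate scan for the first negative running balance, with the final table entry deciding the unbalanced-at-end case.
import Mathlib
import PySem

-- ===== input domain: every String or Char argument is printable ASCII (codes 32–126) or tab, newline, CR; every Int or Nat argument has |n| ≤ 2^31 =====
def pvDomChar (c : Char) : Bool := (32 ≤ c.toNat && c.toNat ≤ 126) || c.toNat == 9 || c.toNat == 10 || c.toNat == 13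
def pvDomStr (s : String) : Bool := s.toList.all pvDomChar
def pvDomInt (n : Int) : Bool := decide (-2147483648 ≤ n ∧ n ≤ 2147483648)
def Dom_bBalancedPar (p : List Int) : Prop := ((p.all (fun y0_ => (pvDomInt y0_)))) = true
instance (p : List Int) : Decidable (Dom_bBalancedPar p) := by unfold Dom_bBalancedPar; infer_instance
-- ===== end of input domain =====

-- B replaces A's single counter loop by building a prefix-sum table first, then scanning it; alternative decomposition, same cost.
-- ===== PORT A =====
-- the enumerate loop: idx is i (advanced past the loop so that the final 'i + 1' is idx), l the counter
def bBalancedParGo : List Int → Int → Int → Int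
  | [], idx, l => if l ≠ 0 then idx else -1
  | c :: rest, idx, l =>
    if c = 40 then bBalancedParGo rest (idx + 1) (l + 1)
    else if c = 41 then
      if l - 1 < 0 then idx else bBalancedParGo rest (idx + 1) (l - 1)
    else bBalancedParGo rest (idx + 1) l

def bBalancedPar (p : List Int) : Int := bBalancedParGo p 0 0

-- ===== PORT B =====
-- running sums of the delta list (the accumulate/append loop of Source B)
def pvAccum : List Int → Int → List Int
  | [], _ => []
  | d :: ds, t => (t + d) :: pvAccum ds (t + d)

-- the per-byte delta of Source B's list comprehension
def pvDelta (c : Int) : Int := if c = 40 then 1 else if c = 41 then -1 else 0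

def bBalancedPar_alt (p : List Int) : Int :=
  let sums := pvAccum (p.map pvDelta) 0
  match sums.findIdx? (fun s => s < 0) with
  | some i => (i : Int)
  | none => if sums ≠ [] ∧ sums.getLastD 0 ≠ 0 then (p.length : Int) else -1

-- ===== PRECONDITION & SPEC =====
def Spec_bBalancedPar (p : List Int) (out : Int) : Prop := out = bBalancedPar_alt p
instance (p : List Int) (out : Int) : Decidable (Spec_bBalancedPar p out) := by unfold Spec_bBalancedPar; infer_instance

-- ===== CLAIM (what is proved, stated in full; the proofs are below) =====
def Claim_equal_bBalancedPar : Prop := ∀ (p : List Int), Dom_bBalancedPar p → Spec_bBalancedPar p (bBalancedPar p)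

-- ===== LEMMAS AND PROOFS =====

-- one cons step of the prefix-sum scan, seen from B's side (t is the new running sum, ¬ t < 0)
theorem pvConsStep (sums : List Int) (t idx len d : Int) (ht : ¬ t < 0) :
    (match (t :: sums).findIdx? (fun s => decide (s < 0)) with
     | some j => idx + (j : Int)
     | none => if (t :: sums).getLastD d ≠ 0 then idx + (len + 1) else -1)
    =
    (match sums.findIdx? (fun s => decide (s < 0)) with
     | some j => (idx + 1) + (j : Int)
     | none => if sums.getLastD t ≠ 0 then (idx + 1) + len else -1) := by
  rw [List.findIdx?_cons, if_neg (by simpa using ht), List.getLastD_cons]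
  cases h : sums.findIdx? (fun s => decide (s < 0)) with
  | some j => simp; ring
  | none => simp; split_ifs <;> ring

-- running-sum invariant: A's loop, started at index idx with counter l ≥ 0, is determined by the prefix sums from l
theorem bBalancedParGo_eq (p : List Int) : ∀ (idx l : Int), 0 ≤ l →
    bBalancedParGo p idx l =
      match (pvAccum (p.map pvDelta) l).findIdx? (fun s => decide (s < 0)) with
      | some j => idx + (j : Int)
      | none => if (pvAccum (p.map pvDelta) l).getLastD l ≠ 0 then idx + (p.length : Int) else -1 := by
  induction p with
  | nil => intro idx l hl; simp [bBalancedParGo, pvAccum]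
  | cons c rest ih =>
    intro idx l hl
    simp only [List.map_cons, pvAccum, List.length_cons, Nat.cast_add, Nat.cast_one]
    by_cases h40 : c = 40
    · rw [show pvDelta c = 1 by simp [pvDelta, h40]]
      rw [pvConsStep _ _ _ _ _ (by omega : ¬ (l + 1 < 0))]
      rw [show bBalancedParGo (c :: rest) idx l = bBalancedParGo rest (idx + 1) (l + 1) from by
        simp [bBalancedParGo, h40]]
      exact ih (idx + 1) (l + 1) (by omega)
    · by_cases h41 : c = 41
      · rw [show pvDelta c = -1 by simp [pvDelta, h41]]
        rw [show l + (-1 : Int) = l - 1 from by ring]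
        by_cases hneg : l - 1 < 0
        · rw [show bBalancedParGo (c :: rest) idx l = idx from by
            simp [bBalancedParGo, h41, hneg]]
          simp [List.findIdx?_cons, hneg]
        · rw [pvConsStep _ _ _ _ _ hneg]
          rw [show bBalancedParGo (c :: rest) idx l = bBalancedParGo rest (idx + 1) (l - 1) from by
            simp [bBalancedParGo, h41, hneg]]
          exact ih (idx + 1) (l - 1) (by omega)
      · rw [show pvDelta c = 0 by simp [pvDelta, h40, h41]]
        rw [show l + (0 : Int) = l from by ring]
        rw [pvConsStep _ _ _ _ _ (by omega : ¬ (l < 0))]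
        rw [show bBalancedParGo (c :: rest) idx l = bBalancedParGo rest (idx + 1) l from by
          simp [bBalancedParGo, h40, h41]]
        exact ih (idx + 1) l hl

-- for a nonempty list getLastD ignores its default
theorem getLastD_irrel {xs : List Int} (h : xs ≠ []) (d e : Int) : xs.getLastD d = xs.getLastD e := by
  cases xs with
  | nil => exact absurd rfl h
  | cons x xs => rw [List.getLastD_cons, List.getLastD_cons]

-- ===== VERDICT (by name: the statement is the Claim_ definition above) =====
theorem bBalancedPar_spec : Claim_equal_bBalancedPar := by
  unfold Claim_equal_bBalancedPar
  intro p _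
  unfold Spec_bBalancedPar bBalancedPar bBalancedPar_alt
  rw [bBalancedParGo_eq p 0 0 le_rfl]
  cases hfi : (pvAccum (p.map pvDelta) 0).findIdx? (fun s => decide (s < 0)) with
  | some j => simp [hfi]
  | none =>
    simp only [hfi]
    by_cases hne : pvAccum (p.map pvDelta) 0 = []
    · simp [hne, List.getLastD]
    · rw [getLastD_irrel hne 0 0]
      simp [hne]
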